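-- pv_equiv track=rewrite | github.com/Harryyan/DataStrucure-Algorithm | 分类/数组-字符串-链表/binary_search.py | find_last_equal_or_less
-- ===== SOURCE A (Python) =====
-- def find_last_equal_or_less(items, target):
--     low = 0
--     high = len(items) - 1
--
--     while low <= high:
--         mid = low + ((high - low) >> 1)
--
--         if items[mid] > target:
--             high = mid - 1
--         else:
--             if mid + 1 == len(items) - 1 or items[mid + 1] > target:
--                 return mid
--             else:
--                 low = mid + 1
--
--     return -1
-- ===== SOURCE B (Python) =====
-- def find_last_equal_or_less(items, target):
--     n = len(items)
--
--     def search(seg, offset):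
--         # seg is the slice items[offset : offset + len(seg)] still under search
--         if not seg:
--             return -1
--         k = (len(seg) - 1) >> 1
--         mid = offset + k
--         if seg[k] > target:
--             return search(seg[:k], offset)
--         if mid + 1 == n - 1 or items[mid + 1] > target:
--             return mid
--         return search(seg[k + 1:], mid + 1)
--
--     return search(items, 0)
-- ===== Notes on version B (the rewrite author's own statement) =====
-- stated objective: alternative
-- what changed: A's while loop mutating low/high indices over the whole list is replaced by a recursion on list segments: a helper carries the still-active slice plus its offset and recurses on seg[:k] or seg[k+1:], so no mutable index state remains.
-- outside the precondition, e.g. on find_last_equal_or_less([5], 7): A raises IndexError, B raises IndexError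
import Mathlib
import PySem

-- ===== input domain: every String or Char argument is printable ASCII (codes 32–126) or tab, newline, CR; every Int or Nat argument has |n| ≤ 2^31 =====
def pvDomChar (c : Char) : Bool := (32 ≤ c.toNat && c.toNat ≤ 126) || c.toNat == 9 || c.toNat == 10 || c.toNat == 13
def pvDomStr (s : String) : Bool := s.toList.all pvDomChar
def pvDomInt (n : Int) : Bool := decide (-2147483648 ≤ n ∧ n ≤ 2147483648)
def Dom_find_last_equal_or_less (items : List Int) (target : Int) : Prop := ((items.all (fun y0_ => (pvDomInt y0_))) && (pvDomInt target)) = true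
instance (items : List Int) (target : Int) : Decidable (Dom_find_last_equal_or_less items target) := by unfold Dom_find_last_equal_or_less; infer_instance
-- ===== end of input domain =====

-- B replaces A's mutable-index while loop over the whole list by a recursion on list
-- SEGMENTS: a helper takes the still-active slice plus its offset and recurses on
-- seg[:k] / seg[k+1:] (objective: alternative decomposition; return value only).

-- ===== PORT A =====
-- A's while loop as recursion on the state (low, high); the Nat fuel only makes the
-- same computation total (it strictly exceeds the loop's measure, so it never runs out).
-- Python's '(high - low) >> 1' is exactly floor division by 2 (arithmetic shift).
-- 'none => -2' marks Python's IndexError (excluded by Pre_; A raises there).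
def findLELoopA (items : List Int) (target : Int) : Nat → Int → Int → Int
  | 0, _, _ => -2
  | fuel + 1, low, high =>
    if low ≤ high then
      let mid := low + PySem.Int.floordiv (high - low) 2
      match PySem.List.pyGet? items mid with
      | none => -2
      | some v =>
        if v > target then
          findLELoopA items target fuel low (mid - 1)
        else
          if mid + 1 = (items.length : Int) - 1 then mid
          else
            match PySem.List.pyGet? items (mid + 1) with
            | none => -2
            | some w =>
              if w > target then mid
              else findLELoopA items target fuel (mid + 1) high
    else -1

def find_last_equal_or_less (items : List Int) (target : Int) : Int :=
  findLELoopA items target (items.length + 1) 0 ((items.length : Int) - 1)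

-- ===== PORT B =====
-- B's helper 'search(seg, offset)' from Source B: structural recursion on the slice still
-- under search (Python's seg[:k] / seg[k+1:] are List.take / List.drop — both bounds
-- are nonnegative and k < len(seg), where the slice is exactly take/drop).
-- 'none => -2' marks Python's IndexError on items[mid+1] (excluded by Pre_).
def findLESegB (items : List Int) (target : Int) (n : Int) (seg : List Int) (offset : Int) : Int :=
  if h : seg = [] then -1
  else
    let k : Nat := (seg.length - 1) / 2
    let mid : Int := offset + (k : Int)
    match PySem.List.pyGet? seg (k : Int) with
    | none => -2
    | some v =>
      if v > target then findLESegB items target n (seg.take k) offset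
      else if mid + 1 = n - 1 then mid
      else
        match PySem.List.pyGet? items (mid + 1) with
        | none => -2
        | some w =>
          if w > target then mid
          else findLESegB items target n (seg.drop (k + 1)) (mid + 1)
termination_by seg.length
decreasing_by
  · have : seg.length ≠ 0 := fun hc => h (List.eq_nil_of_length_eq_zero hc)
    simp [List.length_take]; omega
  · have : seg.length ≠ 0 := fun hc => h (List.eq_nil_of_length_eq_zero hc)
    simp [List.length_drop]; omega

def find_last_equal_or_less_alt (items : List Int) (target : Int) : Int :=
  findLESegB items target (items.length : Int) items 0

-- ===== PRECONDITION & SPEC =====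
-- Pre_ excludes exactly the inputs where the Python (A and B alike) raises IndexError:
-- a one-element list whose element is ≤ target (both read items[1] past the end).
def Pre_find_last_equal_or_less (items : List Int) (target : Int) : Prop :=
  ¬ (items.length = 1 ∧ items.headI ≤ target)
instance (items : List Int) (target : Int) : Decidable (Pre_find_last_equal_or_less items target) := by
  unfold Pre_find_last_equal_or_less; infer_instance

def pvWitness_find_last_equal_or_less : List Int × Int := ([1, 3, 5, 7], 4)

def Spec_find_last_equal_or_less (items : List Int) (target : Int) (out : Int) : Prop :=
  out = find_last_equal_or_less_alt items target
instance (items : List Int) (target : Int) (out : Int) : Decidable (Spec_find_last_equal_or_less items target out) := by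
  unfold Spec_find_last_equal_or_less; infer_instance

-- ===== CLAIM (what is proved, stated in full; the proofs are below) =====
def Claim_equal_find_last_equal_or_less : Prop := ∀ (items : List Int) (target : Int), Dom_find_last_equal_or_less items target → Pre_find_last_equal_or_less items target → Spec_find_last_equal_or_less items target (find_last_equal_or_less items target)

-- ===== LEMMAS AND PROOFS =====

-- The two recursions agree on every state: A at (low, high) equals B at the slice
-- items[low : high+1] with offset low, by induction on A's fuel (which the bound
-- 'high - low + 1 < fuel' keeps from running out). Both ports test the same
-- conditions on the same elements, so no precondition is needed here; Pre_ only
-- removes the inputs where the shared '-2' (IndexError) value is reached.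
lemma loopA_eq_segB (items : List Int) (target : Int) :
    ∀ (fuel : Nat) (low high : Int), 0 ≤ low → high ≤ (items.length : Int) - 1 →
      high - low + 1 < (fuel : Int) → 0 < fuel →
      findLELoopA items target fuel low high
        = findLESegB items target (items.length : Int)
            ((items.drop low.toNat).take (high + 1 - low).toNat) low := by
  intro fuel
  induction fuel with
  | zero => intro low high _ _ _ hpos; omega
  | succ n ih =>
    intro low high hlow hhigh hfuel _
    by_cases hle : low ≤ high
    · -- the segment is nonempty and has length w = high + 1 - low
      have hlen : ((items.drop low.toNat).take (high + 1 - low).toNat).length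
          = (high + 1 - low).toNat := by
        simp [List.length_take, List.length_drop]; omega
      have hne : (items.drop low.toNat).take (high + 1 - low).toNat ≠ [] := by
        intro hc; rw [hc] at hlen; simp at hlen; omega
      rw [findLESegB, dif_neg hne]
      simp only [findLELoopA, if_pos hle, hlen]
      -- the two midpoints coincide
      have hfd : PySem.Int.floordiv (high - low) 2 = (high - low) / 2 :=
        PySem.Int.floordiv_eq_ediv_of_pos (by norm_num)
      set k : Nat := ((high + 1 - low).toNat - 1) / 2 with hk
      have hmid : low + PySem.Int.floordiv (high - low) 2 = low + (k : Int) := by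
        rw [hfd, hk]; omega
      have hkw : k < (high + 1 - low).toNat := by omega
      have hklen : low.toNat + k < items.length := by omega
      -- both element reads are the same list cell
      have hgB : PySem.List.pyGet? ((items.drop low.toNat).take (high + 1 - low).toNat) (k : Int)
          = some items[low.toNat + k] := by
        rw [PySem.List.pyGet?_natCast, List.getElem?_take_of_lt hkw, List.getElem?_drop,
          List.getElem?_eq_getElem hklen]
      have hgA : PySem.List.pyGet? items (low + PySem.Int.floordiv (high - low) 2)
          = some items[low.toNat + k] := by
        have : low + PySem.Int.floordiv (high - low) 2 = ((low.toNat + k : Nat) : Int) := by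
          rw [hmid]; omega
        rw [this, PySem.List.pyGet?_natCast, List.getElem?_eq_getElem hklen]
      rw [hgA, hgB]
      by_cases hgt : items[low.toNat + k] > target
      · -- left half: seg.take k is the slice items[low : mid]
        simp only [if_pos hgt]
        have htk : ((items.drop low.toNat).take (high + 1 - low).toNat).take k
            = (items.drop low.toNat).take ((low + (k : Int) - 1) + 1 - low).toNat := by
          rw [List.take_take]
          congr 1
          omega
        rw [hmid, htk, ih low (low + (k : Int) - 1) hlow (by omega) (by omega) (by omega)]
      · simp only [if_neg hgt, hmid]
        by_cases heq : low + (k : Int) + 1 = (items.length : Int) - 1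
        · simp only [if_pos heq]
        · simp only [if_neg heq]
          cases hg2 : PySem.List.pyGet? items (low + (k : Int) + 1) with
          | none => rfl
          | some w =>
            by_cases hw : w > target
            · simp only [if_pos hw]
            · -- right half: seg.drop (k+1) is the slice items[mid+1 : high+1]
              simp only [if_neg hw]
              have hdk : ((items.drop low.toNat).take (high + 1 - low).toNat).drop (k + 1)
                  = (items.drop (low + (k : Int) + 1).toNat).take (high + 1 - (low + (k : Int) + 1)).toNat := by
                rw [List.drop_take, List.drop_drop]
                congr 1
                · omega
                · congr 1; omega
              rw [hdk, ih (low + (k : Int) + 1) high (by omega) hhigh (by omega) (by omega)]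
    · -- low > high: A returns -1, and the slice is empty so B returns -1
      have hemp : (items.drop low.toNat).take (high + 1 - low).toNat = [] := by
        have : (high + 1 - low).toNat = 0 := by omega
        simp [this]
      rw [hemp, findLESegB]
      simp [findLELoopA, if_neg hle]

-- ===== VERDICT (by name: the statement is the Claim_ definition above) =====
theorem find_last_equal_or_less_spec : Claim_equal_find_last_equal_or_less := by
  intro items target _hdom _hpre
  unfold Spec_find_last_equal_or_less find_last_equal_or_less find_last_equal_or_less_alt
  rw [loopA_eq_segB items target (items.length + 1) 0 ((items.length : Int) - 1)
    le_rfl le_rfl (by push_cast; omega) (by omega)]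
  congr 1
  simp
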